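-- pv_equiv track=rewrite | github.com/JeimmyGutierrez/ADSO_B | plan de mejoramiento/ejercico4.py | longitud_palabra
-- ===== SOURCE A (Python) =====
-- def longitud_palabra(frase):
--     if len (frase) ==0:
--         return 0
--     cantidad=0
--     for i in range (len(frase)):
--         if frase[i]!='':
--             cantidad+=1
--         else:
--             if i < len(frase)-1 and frase[i+1]!='':
--                 cantidad=0
--     return cantidad
-- ===== SOURCE B (Python) =====
-- def longitud_palabra(frase):
--     # For a string, frase[i] is a one-character string and can never equal '',
--     # so A's reset branch is dead code and the count is simply the length.
--     return len(frase)
-- ===== Notes on version B (the rewrite author's own statement) =====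
-- stated objective: simpler
-- what changed: Replaced the per-character counter-with-reset loop by the closed form len(frase): indexing a string always yields a one-character string, so the emptiness test is always true, the reset branch is dead code, and the loop just counts every index.
import Mathlib
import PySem

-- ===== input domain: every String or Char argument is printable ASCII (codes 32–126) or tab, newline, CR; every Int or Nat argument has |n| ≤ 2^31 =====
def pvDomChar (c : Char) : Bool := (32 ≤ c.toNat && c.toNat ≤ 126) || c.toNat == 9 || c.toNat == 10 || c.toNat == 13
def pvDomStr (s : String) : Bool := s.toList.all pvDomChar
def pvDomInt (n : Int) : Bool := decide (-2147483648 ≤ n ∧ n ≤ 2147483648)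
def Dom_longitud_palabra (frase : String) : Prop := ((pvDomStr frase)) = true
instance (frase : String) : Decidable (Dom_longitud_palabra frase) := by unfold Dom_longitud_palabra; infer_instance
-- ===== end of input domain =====

-- B replaces A's counter-with-reset loop by the closed form len(frase): on a string
-- frase[i] is a one-character string, never '', so the reset branch is dead (objective: simpler).

-- ===== PORT A =====
-- frase[i] in Python yields the one-character string; it is modelled as the
-- singleton list [c] of the indexed character, compared against '' = [].
def longitud_palabra (frase : String) : Int :=
  if PySem.Str.len frase = 0 then 0
  else
    (PySem.List.pyRange 0 (PySem.Str.len frase) 1).foldl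
      (fun cantidad i =>
        if ([PySem.List.pyGetD frase.toList i ' '] : List Char) ≠ [] then cantidad + 1
        else if i < PySem.Str.len frase - 1 ∧
                ([PySem.List.pyGetD frase.toList (i + 1) ' '] : List Char) ≠ [] then 0
        else cantidad) 0

-- ===== PORT B =====
def longitud_palabra_alt (frase : String) : Int :=
  PySem.Str.len frase

-- ===== PRECONDITION & SPEC =====
def Spec_longitud_palabra (frase : String) (out : Int) : Prop := out = longitud_palabra_alt frase
instance (frase : String) (out : Int) : Decidable (Spec_longitud_palabra frase out) := by unfold Spec_longitud_palabra; infer_instance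

-- ===== CLAIM (what is proved, stated in full; the proofs are below) =====
def Claim_equal_longitud_palabra : Prop := ∀ (frase : String), Dom_longitud_palabra frase → Spec_longitud_palabra frase (longitud_palabra frase)

-- ===== LEMMAS AND PROOFS =====

-- ===== VERDICT (by name: the statement is the Claim_ definition above) =====
theorem longitud_palabra_spec : Claim_equal_longitud_palabra := by
  intro frase _
  unfold Spec_longitud_palabra longitud_palabra longitud_palabra_alt
  split_ifs with h
  · omega
  · simp only [ne_eq, reduceCtorEq, not_false_eq_true, if_true]
    rw [PySem.List.foldl_add (g := fun _ => (1 : Int))]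
    simp [PySem.List.length_pyRange_one, PySem.Str.len_eq]
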